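-- pv_equiv track=rewrite | github.com/karlb/mondeto | script/pay_leaders.py | leaderboard_tycoons
-- ===== SOURCE A (Python) =====
-- ZERO = "0x" + "00" * 20
--
-- def discrete_price(sale_count: int, epoch: int, ip: int, mp: int) -> int:
--     if sale_count >= epoch:
--         shift = sale_count - epoch
--         if shift >= 128:
--             return (1 << 256) - 1  # type(uint256).max
--         return ip << shift
--     else:
--         shift = epoch - sale_count
--         if shift >= 128:
--             return mp
--         p = ip >> shift
--         return max(p, mp)
--
-- def price_of(sale_count: int, elapsed: int, ip: int, mp: int, ht: int) -> int:
--     epoch_start = elapsed // ht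
--     remainder = elapsed - epoch_start * ht
--     p_start = discrete_price(sale_count, epoch_start, ip, mp)
--     if remainder == 0:
--         return p_start
--     if p_start >= (1 << 256) - 1:
--         return p_start
--     p_end = discrete_price(sale_count, epoch_start + 1, ip, mp)
--     return p_start - (p_start - p_end) * remainder // ht
--
-- def leaderboard_tycoons(
--     owners: list[str],
--     sale_counts: list[int],
--     elapsed: int,
--     ip: int,
--     mp: int,
--     ht: int,
-- ) -> tuple[str, int]:
--     best: dict[str, int] = {}
--     for pid, o in enumerate(owners):
--         if o == ZERO:
--             continue
--         p = price_of(sale_counts[pid], elapsed, ip, mp, ht)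
--         if o not in best or p > best[o]:
--             best[o] = p
--     if not best:
--         return ZERO, 0
--     winner = max(best, key=best.__getitem__)
--     return winner, best[winner]
-- ===== SOURCE B (Python) =====
-- ZERO = "0x" + "00" * 20
--
--
-- def discrete_price(sale_count: int, epoch: int, ip: int, mp: int) -> int:
--     if sale_count >= epoch:
--         shift = sale_count - epoch
--         if shift >= 128:
--             return (1 << 256) - 1  # type(uint256).max
--         return ip << shift
--     else:
--         shift = epoch - sale_count
--         if shift >= 128:
--             return mp
--         p = ip >> shift
--         return max(p, mp)
--
--
-- def price_of(sale_count: int, elapsed: int, ip: int, mp: int, ht: int) -> int: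
--     epoch_start = elapsed // ht
--     remainder = elapsed - epoch_start * ht
--     p_start = discrete_price(sale_count, epoch_start, ip, mp)
--     if remainder == 0:
--         return p_start
--     if p_start >= (1 << 256) - 1:
--         return p_start
--     p_end = discrete_price(sale_count, epoch_start + 1, ip, mp)
--     return p_start - (p_start - p_end) * remainder // ht
--
--
-- def leaderboard_tycoons(
--     owners: list[str],
--     sale_counts: list[int],
--     elapsed: int,
--     ip: int,
--     mp: int,
--     ht: int,
-- ) -> tuple[str, int]:
--     # Pass 1: global maximum price and the set of owners achieving it.
--     top = None
--     achievers = set()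
--     for pid, o in enumerate(owners):
--         if o == ZERO:
--             continue
--         p = price_of(sale_counts[pid], elapsed, ip, mp, ht)
--         if top is None or p > top:
--             top = p
--             achievers = {o}
--         elif p == top:
--             achievers.add(o)
--     if top is None:
--         return ZERO, 0
--     # Pass 2: the first owner (in list order) belonging to the achiever set.
--     for o in owners:
--         if o in achievers:
--             return o, top
-- ===== Notes on version B (the rewrite author's own statement) =====
-- stated objective: alternative
-- what changed: Replaces A's per-owner-best dict plus dict-argmax with a single max-and-achiever-set pass followed by a scan for the first owner (in list order) in the achiever set; tie-break is preserved because the first listed achiever is also the earliest-first-appearing dict key with the maximal best.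
import Mathlib
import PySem

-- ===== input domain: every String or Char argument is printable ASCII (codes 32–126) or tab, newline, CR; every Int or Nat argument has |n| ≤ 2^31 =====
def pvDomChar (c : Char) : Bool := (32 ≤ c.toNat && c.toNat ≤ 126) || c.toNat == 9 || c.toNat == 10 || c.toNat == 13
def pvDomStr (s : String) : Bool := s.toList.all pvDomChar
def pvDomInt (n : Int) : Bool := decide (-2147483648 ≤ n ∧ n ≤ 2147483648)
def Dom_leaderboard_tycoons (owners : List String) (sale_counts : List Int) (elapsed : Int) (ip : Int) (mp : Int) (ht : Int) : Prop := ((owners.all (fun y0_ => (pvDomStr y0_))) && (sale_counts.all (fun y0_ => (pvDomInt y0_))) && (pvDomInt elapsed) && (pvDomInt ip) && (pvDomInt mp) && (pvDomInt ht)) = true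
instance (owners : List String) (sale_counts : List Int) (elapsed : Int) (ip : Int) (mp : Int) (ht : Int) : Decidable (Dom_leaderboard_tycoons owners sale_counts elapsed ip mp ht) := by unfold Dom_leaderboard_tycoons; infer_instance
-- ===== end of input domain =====

-- B replaces A's per-owner-best dict + argmax with one max-and-achiever-set pass
-- followed by a first-achiever scan (objective: alternative decomposition, same cost).

-- ===== PORT A =====
def pvZERO : String := "0x0000000000000000000000000000000000000000"

def pvDiscretePrice (sale_count : Int) (epoch : Int) (ip : Int) (mp : Int) : Int :=
  if sale_count ≥ epoch then
    let shift := sale_count - epoch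
    if shift ≥ 128 then ((1 : Int) <<< (256 : Nat)) - 1
    else ip <<< shift.toNat
  else
    let shift := epoch - sale_count
    if shift ≥ 128 then mp
    else max (ip >>> shift.toNat) mp

def pvPriceOf (sale_count : Int) (elapsed : Int) (ip : Int) (mp : Int) (ht : Int) : Int :=
  let epoch_start := PySem.Int.floordiv elapsed ht
  let remainder := elapsed - epoch_start * ht
  let p_start := pvDiscretePrice sale_count epoch_start ip mp
  if remainder = 0 then p_start
  else if p_start ≥ ((1 : Int) <<< (256 : Nat)) - 1 then p_start
  else
    let p_end := pvDiscretePrice sale_count (epoch_start + 1) ip mp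
    p_start - PySem.Int.floordiv ((p_start - p_end) * remainder) ht

-- the body of A's loop over enumerate(owners)
def pvStepA (price : Int → Int) (best : PySem.Dict String Int) (po : Int × String) :
    PySem.Dict String Int :=
  if po.2 == pvZERO then best
  else
    let p := price po.1
    if best.contains po.2 = false ∨ p > best.getD po.2 0 then best.insert po.2 p else best

def leaderboard_tycoons (owners : List String) (sale_counts : List Int) (elapsed : Int) (ip : Int) (mp : Int) (ht : Int) : String × Int :=
  let price := fun pid => pvPriceOf (PySem.List.pyGetD sale_counts pid 0) elapsed ip mp ht
  let best := (PySem.List.enumerate owners 0).foldl (pvStepA price) PySem.Dict.empty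
  if best.items = [] then (pvZERO, 0)
  else
    let winner := (PySem.List.max? best.keys (fun k => best.getD k 0)).getD pvZERO
    (winner, best.getD winner 0)

-- ===== PORT B =====
-- the body of B's first pass: running maximum price + set of owners achieving it
def pvStepB (price : Int → Int) (st : Option Int × PySem.Set String) (po : Int × String) :
    Option Int × PySem.Set String :=
  if po.2 == pvZERO then st
  else
    let p := price po.1
    match st.1 with
    | none => (some p, PySem.Set.ofList [po.2])
    | some m =>
      if p > m then (some p, PySem.Set.ofList [po.2])
      else if p = m then (st.1, PySem.Set.add st.2 po.2)
      else st

def leaderboard_tycoons_alt (owners : List String) (sale_counts : List Int) (elapsed : Int) (ip : Int) (mp : Int) (ht : Int) : String × Int :=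
  let price := fun pid => pvPriceOf (PySem.List.pyGetD sale_counts pid 0) elapsed ip mp ht
  let st := (PySem.List.enumerate owners 0).foldl (pvStepB price)
    ((none : Option Int), (PySem.Set.empty : PySem.Set String))
  match st.1 with
  | none => (pvZERO, 0)
  | some top =>
    -- second pass: first owner in list order belonging to the achiever set
    ((owners.find? (fun o => PySem.Set.contains st.2 o)).getD pvZERO, top)

-- ===== PRECONDITION & SPEC =====
-- Pre_ excludes exactly the inputs where Python A raises: ht = 0 (ZeroDivisionError) and a
-- non-ZERO owner whose index has no sale_counts entry (IndexError).
def Pre_leaderboard_tycoons (owners : List String) (sale_counts : List Int) (elapsed : Int) (ip : Int) (mp : Int) (ht : Int) : Prop :=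
  ht ≠ 0 ∧ ∀ k : Fin owners.length, owners.get k ≠ pvZERO → (k : Nat) < sale_counts.length
instance (owners : List String) (sale_counts : List Int) (elapsed : Int) (ip : Int) (mp : Int) (ht : Int) : Decidable (Pre_leaderboard_tycoons owners sale_counts elapsed ip mp ht) := by unfold Pre_leaderboard_tycoons; infer_instance

def pvWitness_leaderboard_tycoons : List String × List Int × Int × Int × Int × Int :=
  (["0xab", "0xcd"], [1, 5], 7, 100, 2, 3)

def Spec_leaderboard_tycoons (owners : List String) (sale_counts : List Int) (elapsed : Int) (ip : Int) (mp : Int) (ht : Int) (out : String × Int) : Prop := out = leaderboard_tycoons_alt owners sale_counts elapsed ip mp ht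
instance (owners : List String) (sale_counts : List Int) (elapsed : Int) (ip : Int) (mp : Int) (ht : Int) (out : String × Int) : Decidable (Spec_leaderboard_tycoons owners sale_counts elapsed ip mp ht out) := by unfold Spec_leaderboard_tycoons; infer_instance

-- ===== CLAIM (what is proved, stated in full; the proofs are below) =====
def Claim_equal_leaderboard_tycoons : Prop := ∀ (owners : List String) (sale_counts : List Int) (elapsed : Int) (ip : Int) (mp : Int) (ht : Int), Dom_leaderboard_tycoons owners sale_counts elapsed ip mp ht → Pre_leaderboard_tycoons owners sale_counts elapsed ip mp ht → Spec_leaderboard_tycoons owners sale_counts elapsed ip mp ht (leaderboard_tycoons owners sale_counts elapsed ip mp ht)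

-- ===== LEMMAS AND PROOFS =====


-- the relation between A's dict state and B's (max, achiever-set) state
def pvRel (d : PySem.Dict String Int) (st : Option Int × PySem.Set String) : Prop :=
  d.keys.Nodup ∧
  (∀ k ∈ d.keys, k ≠ pvZERO) ∧
  (st.1 = none → d = PySem.Dict.empty) ∧
  ∀ M, st.1 = some M →
    (∀ o v, d.get? o = some v → v ≤ M) ∧
    (∃ o, d.get? o = some M) ∧
    (∀ o, o ∈ st.2 ↔ d.get? o = some M)

theorem pvMemKeys_of_get? (d : PySem.Dict String Int) {k : String} {v : Int}
    (h : d.get? k = some v) : k ∈ d.keys := by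
  by_contra hk
  rw [← PySem.Dict.get?_eq_none_iff_not_mem_keys] at hk
  rw [hk] at h
  cases h

theorem pvStepA_zero (price : Int → Int) (d : PySem.Dict String Int) (i : Int) (o : String)
    (ho : (o == pvZERO) = true) : pvStepA price d (i, o) = d := by
  simp [pvStepA, ho]

theorem pvStepB_zero (price : Int → Int) (st : Option Int × PySem.Set String) (i : Int)
    (o : String) (ho : (o == pvZERO) = true) : pvStepB price st (i, o) = st := by
  simp [pvStepB, ho]

theorem pvStepA_eq (price : Int → Int) (d : PySem.Dict String Int) (i : Int) (o : String)
    (ho : (o == pvZERO) = false) :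
    pvStepA price d (i, o) =
      if d.contains o = false ∨ price i > d.getD o 0 then d.insert o (price i) else d := by
  simp only [pvStepA, ho, Bool.false_eq_true, if_false]

theorem pvStepB_none (price : Int → Int) (s : PySem.Set String) (i : Int) (o : String)
    (ho : (o == pvZERO) = false) :
    pvStepB price (none, s) (i, o) = (some (price i), PySem.Set.ofList [o]) := by
  simp only [pvStepB, ho, Bool.false_eq_true, if_false]

theorem pvStepB_some (price : Int → Int) (m : Int) (s : PySem.Set String) (i : Int) (o : String)
    (ho : (o == pvZERO) = false) :
    pvStepB price (some m, s) (i, o) =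
      if price i > m then (some (price i), PySem.Set.ofList [o])
      else if price i = m then (some m, PySem.Set.add s o) else (some m, s) := by
  simp only [pvStepB, ho, Bool.false_eq_true, if_false]

theorem pvStep_keys (price : Int → Int) (d : PySem.Dict String Int) (i : Int) (o : String)
    (ho : (o == pvZERO) = false) :
    (pvStepA price d (i, o)).keys = PySem.Set.add d.keys o := by
  rw [pvStepA_eq price d i o ho]
  by_cases hc : d.contains o = true
  · have hmem : o ∈ d.keys := (PySem.Dict.contains_iff_mem_keys d o).mp hc
    by_cases hgt : price i > d.getD o 0
    · rw [if_pos (Or.inr hgt), PySem.Dict.keys_insert_of_contains d _ hc,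
        PySem.Set.add_of_mem hmem]
    · have hncnd : ¬(d.contains o = false ∨ price i > d.getD o 0) := by
        rintro (h | h)
        · simp [hc] at h
        · exact hgt h
      rw [if_neg hncnd, PySem.Set.add_of_mem hmem]
  · have hc' : d.contains o = false := by simpa using hc
    have hmem : o ∉ d.keys := fun hm => hc ((PySem.Dict.contains_iff_mem_keys d o).mpr hm)
    rw [if_pos (Or.inl hc'), PySem.Dict.keys_insert_of_not_contains d _ hc',
      PySem.Set.add_of_not_mem hmem]

theorem pvStep_rel (price : Int → Int) (d : PySem.Dict String Int)
    (st : Option Int × PySem.Set String) (i : Int) (o : String)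
    (ho : (o == pvZERO) = false) (h : pvRel d st) :
    pvRel (pvStepA price d (i, o)) (pvStepB price st (i, o)) := by
  obtain ⟨hnd, hnz, hnone, hsome⟩ := h
  have hoz : o ≠ pvZERO := ne_of_beq_false ho
  have hnd' : ∀ p : Int, (d.insert o p).keys.Nodup :=
    fun p => PySem.Dict.nodup_keys_insert d o p hnd
  have hnz' : ∀ p : Int, ∀ k ∈ (d.insert o p).keys, k ≠ pvZERO := by
    intro p k hk
    rcases (PySem.Dict.mem_keys_insert d o k p).mp hk with rfl | hk'
    · exact hoz
    · exact hnz k hk'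
  obtain ⟨m1, s⟩ := st
  rw [pvStepA_eq price d i o ho]
  cases m1 with
  | none =>
    have hde := hnone rfl
    subst hde
    rw [pvStepB_none price s i o ho]
    have hce : (PySem.Dict.empty : PySem.Dict String Int).contains o = false := by
      rw [PySem.Dict.contains_eq_isSome_get?, PySem.Dict.get?_empty]; rfl
    rw [if_pos (Or.inl hce)]
    refine ⟨hnd' _, hnz' _, by simp, ?_⟩
    intro M hM
    simp only [Option.some.injEq] at hM
    subst hM
    refine ⟨?_, ⟨o, by simp [PySem.Dict.get?_insert]⟩, ?_⟩
    · intro o' v hv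
      rw [PySem.Dict.get?_insert] at hv
      split at hv
      · simp only [Option.some.injEq] at hv; omega
      · rw [PySem.Dict.get?_empty] at hv; cases hv
    · intro o'
      rw [PySem.Dict.get?_insert]
      constructor
      · intro hmem
        have : o' = o := by simpa [PySem.Set.mem_ofList] using hmem
        simp [this]
      · intro hg
        split at hg
        · simp [PySem.Set.mem_ofList, *]
        · rw [PySem.Dict.get?_empty] at hg; cases hg
  | some m =>
    obtain ⟨hbound, ⟨w, hw⟩, hmem⟩ := hsome m rfl
    rw [pvStepB_some price m s i o ho]
    by_cases hgt : price i > m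
    · -- new strict maximum: A inserts, B resets the achiever set
      have hcond : d.contains o = false ∨ price i > d.getD o 0 := by
        cases hc : d.contains o with
        | false => exact Or.inl rfl
        | true =>
          right
          rw [PySem.Dict.contains_eq_isSome_get?] at hc
          obtain ⟨v, hv⟩ := Option.isSome_iff_exists.mp hc
          have := hbound o v hv
          rw [PySem.Dict.getD_of_get?_eq_some _ _ hv]
          omega
      rw [if_pos hcond, if_pos hgt]
      refine ⟨hnd' _, hnz' _, by simp, ?_⟩
      intro M hM
      simp only [Option.some.injEq] at hM
      subst hM
      refine ⟨?_, ⟨o, by simp [PySem.Dict.get?_insert]⟩, ?_⟩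
      · intro o' v hv
        rw [PySem.Dict.get?_insert] at hv
        split at hv
        · simp only [Option.some.injEq] at hv; omega
        · have := hbound o' v hv; omega
      · intro o'
        rw [PySem.Dict.get?_insert]
        constructor
        · intro hmem'
          have : o' = o := by simpa [PySem.Set.mem_ofList] using hmem'
          simp [this]
        · intro hg
          split at hg
          · simp [PySem.Set.mem_ofList, *]
          · have := hbound o' _ hg; omega
    · by_cases heq : price i = m
      · -- price equals the maximum: B adds o to the achiever set
        rw [if_neg hgt, if_pos heq]
        have hstep : pvRel (d.insert o (price i)) (some m, PySem.Set.add s o) := by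
          refine ⟨hnd' _, hnz' _, by simp, ?_⟩
          intro M hM
          simp only [Option.some.injEq] at hM
          subst hM
          refine ⟨?_, ⟨o, by simp [PySem.Dict.get?_insert, heq]⟩, ?_⟩
          · intro o' v hv
            rw [PySem.Dict.get?_insert] at hv
            split at hv
            · simp only [Option.some.injEq] at hv; omega
            · exact hbound o' v hv
          · intro o'
            rw [PySem.Dict.get?_insert, PySem.Set.mem_add]
            by_cases ho' : o' = o
            · simp [ho', heq]
            · simp [ho', hmem o']
        by_cases hc : d.contains o = true
        · by_cases hgt2 : price i > d.getD o 0
          · rw [if_pos (Or.inr hgt2)]; exact hstep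
          · have hncnd : ¬(d.contains o = false ∨ price i > d.getD o 0) := by
              rintro (hh | hh)
              · simp [hc] at hh
              · exact hgt2 hh
            rw [if_neg hncnd]
            -- no insert: o's stored value is already m
            rw [PySem.Dict.contains_eq_isSome_get?] at hc
            obtain ⟨v, hv⟩ := Option.isSome_iff_exists.mp hc
            have hvm : v = m := by
              have h1 := hbound o v hv
              have h2 : price i ≤ d.getD o 0 := not_lt.mp hgt2
              rw [PySem.Dict.getD_of_get?_eq_some _ _ hv] at h2
              omega
            refine ⟨hnd, hnz, by simp, ?_⟩
            intro M hM
            simp only [Option.some.injEq] at hM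
            subst hM
            refine ⟨hbound, ⟨w, hw⟩, ?_⟩
            intro o'
            rw [PySem.Set.mem_add]
            by_cases ho' : o' = o
            · subst ho'; simp [hv, hvm, hmem o']
            · simp [ho', hmem o']
        · have hc' : d.contains o = false := by simpa using hc
          rw [if_pos (Or.inl hc')]
          exact hstep
      · -- price below the maximum: B's state is unchanged
        have hlt : price i < m := lt_of_le_of_ne (not_lt.mp hgt) heq
        rw [if_neg hgt, if_neg heq]
        have hrest : ∀ d' : PySem.Dict String Int,
            d'.keys.Nodup → (∀ k ∈ d'.keys, k ≠ pvZERO) →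
            (∀ o' v, d'.get? o' = some v → v ≤ m) →
            (∃ o', d'.get? o' = some m) →
            (∀ o', o' ∈ s ↔ d'.get? o' = some m) →
            pvRel d' (some m, s) := by
          intro d' h1 h2 h3 h4 h5
          refine ⟨h1, h2, by simp, ?_⟩
          intro M hM
          simp only [Option.some.injEq] at hM
          subst hM
          exact ⟨h3, h4, h5⟩
        have hinsert : d.get? o ≠ some m →
            pvRel (d.insert o (price i)) (some m, s) := by
          intro hgo
          apply hrest _ (hnd' _) (hnz' _)
          · intro o' v hv
            rw [PySem.Dict.get?_insert] at hv
            split at hv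
            · simp only [Option.some.injEq] at hv; omega
            · exact hbound o' v hv
          · refine ⟨w, ?_⟩
            rw [PySem.Dict.get?_insert]
            have hwo : w ≠ o := by rintro rfl; exact hgo hw
            rw [if_neg hwo]; exact hw
          · intro o'
            rw [PySem.Dict.get?_insert]
            by_cases ho' : o' = o
            · subst ho'
              have h1 : o' ∉ s := fun hs => hgo ((hmem o').mp hs)
              rw [if_pos rfl]
              constructor
              · intro hs; exact absurd hs h1
              · intro hpm
                simp only [Option.some.injEq] at hpm
                exact absurd hpm (ne_of_lt hlt)
            · rw [if_neg ho']; exact hmem o'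
        by_cases hc : d.contains o = true
        · rw [PySem.Dict.contains_eq_isSome_get?] at hc
          obtain ⟨v, hv⟩ := Option.isSome_iff_exists.mp hc
          by_cases hgt2 : price i > d.getD o 0
          · rw [if_pos (Or.inr hgt2)]
            apply hinsert
            intro hgo
            rw [hv] at hgo
            simp only [Option.some.injEq] at hgo
            rw [PySem.Dict.getD_of_get?_eq_some _ _ hv] at hgt2
            omega
          · have hncnd : ¬(d.contains o = false ∨ price i > d.getD o 0) := by
              rintro (hh | hh)
              · rw [PySem.Dict.contains_eq_isSome_get?, hv] at hh; cases hh
              · exact hgt2 hh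
            rw [if_neg hncnd]
            exact hrest d hnd hnz hbound ⟨w, hw⟩ hmem
        · have hc' : d.contains o = false := by simpa using hc
          rw [if_pos (Or.inl hc')]
          apply hinsert
          intro hgo
          rw [PySem.Dict.contains_eq_isSome_get?, hgo] at hc'
          cases hc'

theorem pvLoop (price : Int → Int) (l : List (Int × String)) :
    ∀ (d : PySem.Dict String Int) (st : Option Int × PySem.Set String), pvRel d st →
    pvRel (l.foldl (pvStepA price) d) (l.foldl (pvStepB price) st) ∧
    (l.foldl (pvStepA price) d).keys =
      PySem.Set.update d.keys ((l.map (·.2)).filter (fun o => !(o == pvZERO))) := by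
  induction l with
  | nil => intro d st h; exact ⟨h, by simp [PySem.Set.update_nil]⟩
  | cons po t ih =>
    intro d st h
    obtain ⟨i, o⟩ := po
    by_cases ho : (o == pvZERO) = true
    · have hA : pvStepA price d (i, o) = d := pvStepA_zero price d i o ho
      have hB : pvStepB price st (i, o) = st := pvStepB_zero price st i o ho
      simp only [List.foldl_cons, hA, hB, List.map_cons, List.filter_cons, ho]
      simpa using ih d st h
    · have ho' : (o == pvZERO) = false := by simpa using ho
      have h' := pvStep_rel price d st i o ho' h
      have hk := pvStep_keys price d i o ho'
      obtain ⟨ih1, ih2⟩ := ih (pvStepA price d (i, o)) (pvStepB price st (i, o)) h'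
      refine ⟨by simpa using ih1, ?_⟩
      simp only [List.foldl_cons, List.map_cons, List.filter_cons, ho']
      simp only [Bool.not_false, if_pos trivial]
      rw [ih2, hk, PySem.Set.update_cons]

-- max? as "first element achieving the maximum"

theorem pvFind?_congr {α : Type} (p q : α → Bool) (l : List α) (h : ∀ x ∈ l, p x = q x) :
    l.find? p = l.find? q := by
  induction l with
  | nil => rfl
  | cons x t ih =>
    have hx := h x (by simp)
    simp only [List.find?_cons, hx]
    cases hq : q x with
    | true => rfl
    | false => exact ih (fun y hy => h y (by simp [hy]))

theorem pvFind?_filter {α : Type} (p q : α → Bool) (l : List α) :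
    (l.filter p).find? q = l.find? (fun x => p x && q x) := by
  induction l with
  | nil => rfl
  | cons x t ih =>
    by_cases hp : p x = true
    · simp only [List.filter_cons, hp, if_pos trivial, List.find?_cons, Bool.true_and]
      cases hq : q x <;> simp [hq, ih]
    · simp only [Bool.not_eq_true] at hp
      simp [List.filter_cons, hp, List.find?_cons, ih]

theorem pvFind?_filter_ne {α : Type} [BEq α] [LawfulBEq α] (p : α → Bool) (x : α)
    (hx : p x = false) (l : List α) :
    (l.filter (fun y => !(y == x))).find? p = l.find? p := by
  rw [pvFind?_filter]
  apply pvFind?_congr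
  intro y _
  by_cases hyx : y = x
  · subst hyx; simp [hx]
  · simp [hyx]

theorem pvFind?_ofList {α : Type} [BEq α] [LawfulBEq α] (p : α → Bool) (ys : List α) :
    (PySem.Set.ofList ys).find? p = ys.find? p := by
  induction ys with
  | nil => rfl
  | cons y t ih =>
    rw [PySem.Set.ofList_cons]
    simp only [List.find?_cons]
    cases hp : p y with
    | true => rfl
    | false =>
      show (PySem.Set.discard (PySem.Set.ofList t) y).find? p = _
      unfold PySem.Set.discard
      rw [pvFind?_filter_ne p y hp, ih]

def pvMaxStep (key : String → Int) (acc : Option String) (x : String) : Option String :=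
  match acc with
  | none => some x
  | some m => if key m < key x then some x else some m

theorem pvMaxStep_some (key : String → Int) (m x : String) :
    pvMaxStep key (some m) x = if key m < key x then some x else some m := rfl

theorem pvFold_stay (key : String → Int) (t : List String) (m : String)
    (hb : ∀ y ∈ t, key y ≤ key m) :
    t.foldl (pvMaxStep key) (some m) = some m := by
  induction t with
  | nil => rfl
  | cons y t ih =>
    have h1 : ¬ key m < key y := not_lt.mpr (hb y (by simp))
    simp only [List.foldl_cons, pvMaxStep_some, if_neg h1]
    exact ih (fun z hz => hb z (by simp [hz]))

theorem pvFold_find (key : String → Int) (M : Int) (t : List String) (m : String)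
    (hm : key m < M) (hb : ∀ y ∈ t, key y ≤ M) (hex : ∃ y ∈ t, key y = M) :
    t.foldl (pvMaxStep key) (some m) = t.find? (fun x => decide (key x = M)) := by
  induction t generalizing m with
  | nil => obtain ⟨y, hy, _⟩ := hex; simp at hy
  | cons y t ih =>
    by_cases hy : key y = M
    · have h1 : key m < key y := hy ▸ hm
      simp only [List.foldl_cons, List.find?_cons, pvMaxStep_some]
      rw [if_pos h1]
      simp only [hy, decide_true]
      exact pvFold_stay key t y (fun z hz => le_of_le_of_eq (hb z (by simp [hz])) hy.symm)
    · have hyM : key y < M := lt_of_le_of_ne (hb y (by simp)) hy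
      have hex' : ∃ z ∈ t, key z = M := by
        obtain ⟨z, hz, hzM⟩ := hex
        rcases List.mem_cons.mp hz with h | h
        · exact absurd (h ▸ hzM) hy
        · exact ⟨z, h, hzM⟩
      have hb' : ∀ z ∈ t, key z ≤ M := fun z hz => hb z (by simp [hz])
      simp only [List.foldl_cons, List.find?_cons, pvMaxStep_some, hy, decide_false]
      by_cases h1 : key m < key y
      · simp only [if_pos h1]; exact ih y hyM hb' hex'
      · simp only [if_neg h1]; exact ih m hm hb' hex'

theorem pvMax?_eq_find? (key : String → Int) (M : Int) (xs : List String)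
    (hb : ∀ y ∈ xs, key y ≤ M) (hex : ∃ y ∈ xs, key y = M) :
    PySem.List.max? xs key = xs.find? (fun x => decide (key x = M)) := by
  cases xs with
  | nil => obtain ⟨y, hy, _⟩ := hex; simp at hy
  | cons x t =>
    have hmax : PySem.List.max? (x :: t) key = (x :: t).foldl (pvMaxStep key) none := by
      unfold PySem.List.max?
      congr 1
      funext acc z
      cases acc <;> rfl
    rw [hmax]
    simp only [List.foldl_cons, List.find?_cons]
    show t.foldl (pvMaxStep key) (some x) = _
    by_cases hx : key x = M
    · simp only [hx, decide_true]
      exact pvFold_stay key t x (fun z hz => le_of_le_of_eq (hb z (by simp [hz])) hx.symm)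
    · have hxM : key x < M := lt_of_le_of_ne (hb x (by simp)) hx
      have hex' : ∃ z ∈ t, key z = M := by
        obtain ⟨z, hz, hzM⟩ := hex
        rcases List.mem_cons.mp hz with h | h
        · exact absurd (h ▸ hzM) hx
        · exact ⟨z, h, hzM⟩
      simp only [hx, decide_false]
      exact pvFold_find key M t x hxM (fun z hz => hb z (by simp [hz])) hex'


theorem pvFinal (owners : List String) (d : PySem.Dict String Int)
    (st : Option Int × PySem.Set String) (hrel : pvRel d st)
    (hkeys : d.keys = PySem.Set.ofList (owners.filter (fun o => !(o == pvZERO)))) :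
    (if d.items = [] then (pvZERO, (0 : Int))
     else ((PySem.List.max? d.keys (fun k => d.getD k 0)).getD pvZERO,
           d.getD ((PySem.List.max? d.keys (fun k => d.getD k 0)).getD pvZERO) 0))
    = (match st.1 with
       | none => (pvZERO, (0 : Int))
       | some top => ((owners.find? (fun o => PySem.Set.contains st.2 o)).getD pvZERO, top)) := by
  obtain ⟨hnd, hnz, hnone, hsome⟩ := hrel
  cases hm : st.1 with
  | none =>
    have hde := hnone hm
    subst hde
    rw [if_pos (show (PySem.Dict.empty : PySem.Dict String Int).items = [] from rfl)]
  | some M =>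
    obtain ⟨hbound, ⟨w, hw⟩, hmem⟩ := hsome M hm
    have hne : d.items ≠ [] := by
      have hmemi := PySem.Dict.mem_items_of_get?_eq_some d hw
      intro he
      rw [he] at hmemi
      cases hmemi
    rw [if_neg hne]
    have hwk : w ∈ d.keys := pvMemKeys_of_get? d hw
    have hkb : ∀ k ∈ d.keys, d.getD k 0 ≤ M := by
      intro k hk
      cases hg : d.get? k with
      | none => exact absurd ((PySem.Dict.get?_eq_none_iff_not_mem_keys d k).mp hg) (by simp [hk])
      | some v =>
        rw [PySem.Dict.getD_of_get?_eq_some _ _ hg]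
        exact hbound k v hg
    have hex : ∃ y ∈ d.keys, d.getD y 0 = M :=
      ⟨w, hwk, PySem.Dict.getD_of_get?_eq_some _ _ hw⟩
    rw [pvMax?_eq_find? (fun k => d.getD k 0) M d.keys hkb hex]
    have hcongr : d.keys.find? (fun k => decide (d.getD k 0 = M))
        = d.keys.find? (fun k => decide (d.get? k = some M)) := by
      apply pvFind?_congr
      intro k hk
      cases hg : d.get? k with
      | none => exact absurd ((PySem.Dict.get?_eq_none_iff_not_mem_keys d k).mp hg) (by simp [hk])
      | some v =>
        rw [PySem.Dict.getD_of_get?_eq_some _ _ hg]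
        by_cases hv : v = M <;> simp [hv]
    rw [hcongr, hkeys, pvFind?_ofList, pvFind?_filter]
    have hQ : owners.find? (fun o => (!(o == pvZERO)) && decide (d.get? o = some M))
        = owners.find? (fun o => PySem.Set.contains st.2 o) := by
      apply pvFind?_congr
      intro o _
      by_cases hq : d.get? o = some M
      · have hoz : o ≠ pvZERO := hnz o (pvMemKeys_of_get? d hq)
        have hcs : PySem.Set.contains st.2 o = true :=
          (PySem.Set.contains_iff st.2 o).mpr ((hmem o).mpr hq)
        have h1 : (o == pvZERO) = false := beq_eq_false_iff_ne.mpr hoz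
        rw [hcs, h1, decide_eq_true hq]
        rfl
      · have hcs : PySem.Set.contains st.2 o = false := by
          cases hcc : PySem.Set.contains st.2 o with
          | false => rfl
          | true => exact absurd ((hmem o).mp ((PySem.Set.contains_iff st.2 o).mp hcc)) hq
        rw [hcs, decide_eq_false hq, Bool.and_false]
    rw [hQ]
    have hwsome : (owners.find? (fun o => PySem.Set.contains st.2 o)).isSome := by
      rw [List.find?_isSome]
      refine ⟨w, ?_, (PySem.Set.contains_iff st.2 w).mpr ((hmem w).mpr hw)⟩
      have : w ∈ owners.filter (fun o => !(o == pvZERO)) := by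
        rw [hkeys] at hwk
        exact (PySem.Set.mem_ofList _ w).mp hwk
      exact List.mem_of_mem_filter this
    obtain ⟨wf, hwf⟩ := Option.isSome_iff_exists.mp hwsome
    have hwfM : d.get? wf = some M :=
      (hmem wf).mp ((PySem.Set.contains_iff st.2 wf).mp (List.find?_some hwf))
    rw [hwf]
    simp only [Option.getD_some]
    rw [PySem.Dict.getD_of_get?_eq_some _ _ hwfM]

-- ===== VERDICT (by name: the statement is the Claim_ definition above) =====
theorem leaderboard_tycoons_spec : Claim_equal_leaderboard_tycoons := by
  intro owners sale_counts elapsed ip mp ht _ _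
  unfold Spec_leaderboard_tycoons leaderboard_tycoons leaderboard_tycoons_alt
  simp only []
  have h0 : pvRel PySem.Dict.empty ((none : Option Int), (PySem.Set.empty : PySem.Set String)) := by
    refine ⟨by simp [PySem.Dict.keys_empty], by simp [PySem.Dict.keys_empty], fun _ => rfl, ?_⟩
    intro M hM
    cases hM
  obtain ⟨hrel, hkeys⟩ := pvLoop (fun pid => pvPriceOf (PySem.List.pyGetD sale_counts pid 0) elapsed ip mp ht)
    (PySem.List.enumerate owners 0) PySem.Dict.empty ((none : Option Int), (PySem.Set.empty : PySem.Set String)) h0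
  have hkeys' : ((PySem.List.enumerate owners 0).foldl
      (pvStepA (fun pid => pvPriceOf (PySem.List.pyGetD sale_counts pid 0) elapsed ip mp ht))
      PySem.Dict.empty).keys
      = PySem.Set.ofList (owners.filter (fun o => !(o == pvZERO))) := by
    rw [hkeys, PySem.Dict.keys_empty, PySem.Set.update_nil_left,
      show List.map (fun x => x.2) (PySem.List.enumerate owners 0) = owners from
        PySem.List.map_snd_enumerate owners 0]
  exact pvFinal owners _ _ hrel hkeys'
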